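-- pv_equiv track=rewrite | github.com/caio86/g4m3 | treino/p0177.py | solve
-- ===== SOURCE A (Python) =====
-- def solve(n: int, m: int) -> list[list[int]]:
--     tabela = [[1 for _ in range(n)] for _ in range(n)]
--
--     def formula(x: int) -> int:
--         return (2 * x) % m
--
--     for i in range(n):
--         for j in range(n):
--             if i == 0 and j == 0:
--                 tabela[i][j] = 1
--                 continue
--             if j == 0:
--                 acima = tabela[i - 1][j]
--                 tabela[i][j] = formula(acima)
--                 continue
--             anterior = tabela[i][j - 1]
--             tabela[i][j] = formula(anterior)
--     return tabela
-- ===== SOURCE B (Python) =====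
-- def solve(n: int, m: int) -> list[list[int]]:
--     if n <= 0:
--         return []
--     pow2 = [1]
--     for _ in range(2 * n - 2):
--         pow2.append((2 * pow2[-1]) % m)
--     return [[pow2[i + j] for j in range(n)] for i in range(n)]
-- ===== Notes on version B (the rewrite author's own statement) =====
-- stated objective: simpler
-- what changed: Replaces the in-place table with a neighbour-propagation recurrence (copy from the cell above for column 0, else from the cell to the left) by a single 1-D iterated-doubling list pow2 of length 2n-1 and a direct comprehension fill table[i][j] = pow2[i+j].
import Mathlib
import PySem

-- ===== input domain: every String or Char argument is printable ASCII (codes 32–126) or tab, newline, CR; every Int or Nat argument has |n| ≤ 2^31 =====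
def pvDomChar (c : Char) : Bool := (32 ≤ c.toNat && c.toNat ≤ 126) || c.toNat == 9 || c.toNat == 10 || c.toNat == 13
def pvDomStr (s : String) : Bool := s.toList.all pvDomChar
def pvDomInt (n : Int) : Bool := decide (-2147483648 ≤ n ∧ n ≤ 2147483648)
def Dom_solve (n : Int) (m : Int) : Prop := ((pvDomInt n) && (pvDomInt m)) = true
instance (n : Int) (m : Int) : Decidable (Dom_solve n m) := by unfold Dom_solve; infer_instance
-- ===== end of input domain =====

-- B replaces A's in-place neighbour-propagation table with a 1-D iterated-doubling list pow2
-- (pow2[k] = (2*pow2[k-1]) % m, pow2[0] = 1) and a direct fill table[i][j] = pow2[i+j]; objective: simpler.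

-- ===== PORT A =====
-- helper: the nested `formula` closure of A
def pvFormula (m : Int) (x : Int) : Int := PySem.Int.mod (2 * x) m

-- helper: `tabela[i][j] = v` on the nested list
def pvSet2 (tab : List (List Int)) (i : Int) (j : Int) (v : Int) : List (List Int) :=
  PySem.List.pySetD tab i (PySem.List.pySetD (PySem.List.pyGetD tab i []) j v)

-- helper: `tabela[i][j]`
def pvGet2 (tab : List (List Int)) (i : Int) (j : Int) : Int :=
  PySem.List.pyGetD (PySem.List.pyGetD tab i []) j 0

-- helper: the inner `for j in range(n)` loop of A for a fixed i
def pvInner (n : Int) (m : Int) (i : Int) (tab : List (List Int)) : List (List Int) :=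
  (PySem.List.pyRange 0 n 1).foldl (fun tab j =>
    if i == 0 && j == 0 then pvSet2 tab i j 1
    else if j == 0 then pvSet2 tab i j (pvFormula m (pvGet2 tab (i - 1) j))
    else pvSet2 tab i j (pvFormula m (pvGet2 tab i (j - 1)))) tab

def solve (n : Int) (m : Int) : List (List Int) :=
  let tabela : List (List Int) :=
    (PySem.List.pyRange 0 n 1).map (fun _ => (PySem.List.pyRange 0 n 1).map (fun _ => (1 : Int)))
  (PySem.List.pyRange 0 n 1).foldl (fun tab i => pvInner n m i tab) tabela

-- ===== PORT B =====
def solve_alt (n : Int) (m : Int) : List (List Int) :=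
  if n ≤ 0 then []
  else
    let pow2 : List Int :=
      (PySem.List.pyRange 0 (2 * n - 2) 1).foldl
        (fun pw _ => pw ++ [PySem.Int.mod (2 * PySem.List.pyGetD pw (-1) 0) m]) [1]
    (PySem.List.pyRange 0 n 1).map (fun i =>
      (PySem.List.pyRange 0 n 1).map (fun j => PySem.List.pyGetD pow2 (i + j) 0))

-- ===== PRECONDITION & SPEC =====
-- Pre_ excludes exactly m = 0 with n ≥ 2, where A's `(2*x) % m` raises ZeroDivisionError
-- (for n ≤ 1 the modulo is never evaluated and A returns normally even for m = 0).
def Pre_solve (n : Int) (m : Int) : Prop := m ≠ 0 ∨ n ≤ 1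
instance (n : Int) (m : Int) : Decidable (Pre_solve n m) := by unfold Pre_solve; infer_instance
def pvWitness_solve : Int × Int := (3, 5)

def Spec_solve (n : Int) (m : Int) (out : List (List Int)) : Prop := out = solve_alt n m
instance (n : Int) (m : Int) (out : List (List Int)) : Decidable (Spec_solve n m out) := by unfold Spec_solve; infer_instance

-- ===== CLAIM (what is proved, stated in full; the proofs are below) =====
def Claim_equal_solve : Prop := ∀ (n : Int) (m : Int), Dom_solve n m → Pre_solve n m → Spec_solve n m (solve n m)

-- ===== LEMMAS AND PROOFS =====

-- 2^k mod m computed as A's propagation / B's doubling both iterate this function from 1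
def pvPw (m : Int) : Nat → Int
  | 0 => 1
  | k + 1 => PySem.Int.mod (2 * pvPw m k) m

-- the intended row i of the final table (N = n)
def pvRow (m : Int) (N i : Nat) : List Int := (List.range N).map (fun c => pvPw m (i + c))

-- B's pow2 list after t appends, starting from the first s+1 values
lemma pv_b_fold (m : Int) (t s : Nat) :
    (List.range t).foldl
      (fun pw _ => pw ++ [PySem.Int.mod (2 * PySem.List.pyGetD pw (-1) 0) m])
      ((List.range (s + 1)).map (pvPw m))
    = (List.range (s + 1 + t)).map (pvPw m) := by
  induction t with
  | zero => simp
  | succ t ih =>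
    rw [List.range_succ (n := t), List.foldl_append, ih]
    have hne : ((List.range (s + 1 + t)).map (pvPw m)) ≠ [] := by simp
    rw [List.foldl_cons, List.foldl_nil, PySem.List.pyGetD_neg_one _ _ hne,
      List.getLast_eq_getElem]
    have h1 : s + 1 + (t + 1) = (s + 1 + t) + 1 := by omega
    rw [h1, List.range_succ, List.map_append]
    simp only [List.length_map, List.length_range, List.getElem_map, List.getElem_range]
    have h3 : s + 1 + t = (s + t) + 1 := by omega
    simp [h3, pvPw]

-- closed form of B for positive n
lemma pv_alt_closed (n m : Int) (h : 0 < n) :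
    solve_alt n m
    = (List.range n.toNat).map (fun i => (List.range n.toNat).map (fun j => pvPw m (i + j))) := by
  have hn0 : ¬ n ≤ 0 := by omega
  unfold solve_alt
  rw [if_neg hn0]
  have hrw : PySem.List.pyRange 0 (2 * n - 2) 1
      = (List.range (2 * n - 2).toNat).map (fun k : Nat => ((0 : Int) + k)) := by
    rw [PySem.List.pyRange_one]; norm_num
  have hone : ([ (1 : Int) ]) = (List.range (0 + 1)).map (pvPw m) := by simp [pvPw]
  rw [hrw, List.foldl_map, hone, pv_b_fold m ((2 * n - 2).toNat) 0]
  rw [PySem.List.pyRange_one]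
  norm_num
  intro a ha b hb
  have hab : ((a : Int) + (b : Int)) = ((a + b : Nat) : Int) := by push_cast; ring
  rw [hab, PySem.List.pyGetD_natCast]
  have hlt : a + b < 1 + (2 * n - 2).toNat := by omega
  simp [List.getD_eq_getElem?_getD, hlt]

-- Nat-indexed form of A's inner-loop step (what the Int step computes at cast indices)
def pvStepN (m : Int) (i : Nat) (tab : List (List Int)) (j : Nat) : List (List Int) :=
  if i = 0 ∧ j = 0 then tab.set i ((tab.getD i []).set j 1)
  else if j = 0 then
    tab.set i ((tab.getD i []).set j (PySem.Int.mod (2 * ((tab.getD (i - 1) []).getD 0 0)) m))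
  else
    tab.set i ((tab.getD i []).set j (PySem.Int.mod (2 * ((tab.getD i []).getD (j - 1) 0)) m))

-- A's inner loop, re-expressed over Nat indices
lemma pv_inner_eq (n m : Int) (i : Nat) (tab : List (List Int)) :
    pvInner n m (i : Int) tab = (List.range (n - 0).toNat).foldl (pvStepN m i) tab := by
  unfold pvInner
  rw [PySem.List.pyRange_one, List.foldl_map]
  apply PySem.List.foldl_congr_mem
  intro acc j _
  simp only [zero_add]
  by_cases hi : i = 0 <;> by_cases hj : j = 0
  · subst hi; subst hj
    simp [pvStepN, pvSet2, PySem.List.pySetD_of_nonneg, PySem.List.pyGetD_zero]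
  · subst hi
    have hjF : ((j : Int) == 0) = false := beq_eq_false_iff_ne.mpr (Int.natCast_ne_zero.mpr hj)
    have hj1 : ((j : Int)) - 1 = ((j - 1 : Nat) : Int) := by
      rw [Nat.cast_sub (by omega : 1 ≤ j)]; norm_num
    rw [hj1]
    simp [pvStepN, pvSet2, pvGet2, pvFormula, hjF, hj, PySem.List.pySetD_of_nonneg,
      PySem.List.pyGetD_zero, PySem.List.pyGetD_natCast]
  · subst hj
    have hiF : ((i : Int) == 0) = false := beq_eq_false_iff_ne.mpr (Int.natCast_ne_zero.mpr hi)
    have hi1 : ((i : Int)) - 1 = ((i - 1 : Nat) : Int) := by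
      rw [Nat.cast_sub (by omega : 1 ≤ i)]; norm_num
    rw [hi1]
    simp [pvStepN, pvSet2, pvGet2, pvFormula, hiF, hi, PySem.List.pySetD_of_nonneg,
      PySem.List.pyGetD_zero, PySem.List.pyGetD_natCast]
  · have hiF : ((i : Int) == 0) = false := beq_eq_false_iff_ne.mpr (Int.natCast_ne_zero.mpr hi)
    have hjF : ((j : Int) == 0) = false := beq_eq_false_iff_ne.mpr (Int.natCast_ne_zero.mpr hj)
    have hj1 : ((j : Int)) - 1 = ((j - 1 : Nat) : Int) := by
      rw [Nat.cast_sub (by omega : 1 ≤ j)]; norm_num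
    rw [hj1]
    simp [pvStepN, pvSet2, pvGet2, pvFormula, hiF, hjF, hi, hj,
      PySem.List.pySetD_natCast, PySem.List.pyGetD_natCast]

lemma pv_getD_set_self (l : List (List Int)) (i : Nat) (r : List Int) (h : i < l.length) :
    (l.set i r).getD i [] = r := by
  rw [List.getD_eq_getElem?_getD, List.getElem?_set_self (by simpa using h)]
  rfl

-- invariant of A's inner loop: after j steps, row i holds pvPw (i+c) for c < j and its old tail
lemma pv_inner_aux (m : Int) (N i : Nat) (hi : i < N) (tab : List (List Int))
    (hlen : tab.length = N) (hrl : (tab.getD i []).length = N)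
    (hprev : 1 ≤ i → (tab.getD (i - 1) []).getD 0 0 = pvPw m (i - 1)) :
    ∀ j, 1 ≤ j → j ≤ N →
      (List.range j).foldl (pvStepN m i) tab
      = tab.set i (((List.range j).map (fun c => pvPw m (i + c))) ++ (tab.getD i []).drop j) := by
  intro j hj1 hjN
  induction j with
  | zero => omega
  | succ j ih =>
    by_cases hj0 : j = 0
    · subst hj0
      simp only [Nat.zero_add, List.range_one, List.foldl_cons, List.foldl_nil]
      have hrow : tab.getD i [] = (tab.getD i []).getD 0 0 :: (tab.getD i []).drop 1 := by
        cases hr : tab.getD i [] with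
        | nil => exfalso; rw [hr] at hrl; simp at hrl; omega
        | cons x xs => exact rfl
      by_cases hi0 : i = 0
      · subst hi0
        unfold pvStepN
        rw [if_pos ⟨rfl, rfl⟩]
        congr 1
        conv_lhs => rw [hrow]
        simp [pvPw]
      · unfold pvStepN
        rw [if_neg (by simp [hi0]), if_pos rfl]
        congr 1
        conv_lhs => rw [hrow]
        rw [hprev (by omega)]
        have hv : PySem.Int.mod (2 * pvPw m (i - 1)) m = pvPw m i := by
          conv_rhs => rw [show i = (i - 1) + 1 by omega]
          simp [pvPw]
        simp [hv]
    · have hj : 1 ≤ j := by omega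
      rw [List.range_succ, List.foldl_append, ih hj (by omega), List.foldl_cons, List.foldl_nil]
      set row := tab.getD i [] with hrowdef
      have hrowj : row.drop j = row[j] :: row.drop (j + 1) := by
        rw [List.drop_eq_getElem_cons (by omega)]
      have hget : ((tab.set i ((List.range j).map (fun c => pvPw m (i + c)) ++ row.drop j)).getD i [])
          = (List.range j).map (fun c => pvPw m (i + c)) ++ row.drop j :=
        pv_getD_set_self _ _ _ (by omega)
      simp only [pvStepN]
      rw [if_neg (by omega : ¬ (i = 0 ∧ j = 0)), if_neg hj0]
      rw [hget, List.set_set]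
      congr 1
      have hprefix : ((List.range j).map (fun c => pvPw m (i + c))).length = j := by simp
      have hread : ((List.range j).map (fun c => pvPw m (i + c)) ++ row.drop j).getD (j - 1) 0
          = pvPw m (i + (j - 1)) := by
        rw [List.getD_eq_getElem?_getD,
          List.getElem?_append_left (show j - 1 < ((List.range j).map (fun c => pvPw m (i + c))).length by omega)]
        simp [List.getElem?_range (show j - 1 < j by omega)]
      rw [hread]
      have hval : PySem.Int.mod (2 * pvPw m (i + (j - 1))) m = pvPw m (i + j) := by
        conv_rhs => rw [show i + j = (i + (j - 1)) + 1 by omega]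
        simp [pvPw]
      rw [hval]
      rw [List.set_append_right _ _
        (show ((List.range j).map (fun c => pvPw m (i + c))).length ≤ j by omega)]
      rw [hprefix, Nat.sub_self, hrowj, List.set_cons_zero]
      simp

-- A's inner loop writes exactly row i of the intended table
lemma pv_inner_fold (m : Int) (N i : Nat) (hi : i < N) (tab : List (List Int))
    (hlen : tab.length = N) (hrl : (tab.getD i []).length = N)
    (hprev : 1 ≤ i → (tab.getD (i - 1) []).getD 0 0 = pvPw m (i - 1)) :
    (List.range N).foldl (pvStepN m i) tab = tab.set i (pvRow m N i) := by
  have h := pv_inner_aux m N i hi tab hlen hrl hprev N (by omega) le_rfl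
  rw [h, ← hrl, List.drop_length, List.append_nil]
  rfl

-- invariant of A's outer loop
lemma pv_outer_aux (m : Int) (N : Nat) :
    ∀ k, k ≤ N →
      (List.range k).foldl (fun tab i => (List.range N).foldl (pvStepN m i) tab)
        (List.replicate N (List.replicate N (1 : Int)))
      = ((List.range k).map (pvRow m N)) ++ List.replicate (N - k) (List.replicate N (1 : Int)) := by
  intro k hk
  induction k with
  | zero => simp
  | succ k ih =>
    rw [List.range_succ (n := k), List.foldl_append, ih (by omega), List.foldl_cons, List.foldl_nil]
    set pref := (List.range k).map (pvRow m N) with hpref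
    have hpl : pref.length = k := by simp [hpref]
    have hlen : (pref ++ List.replicate (N - k) (List.replicate N (1 : Int))).length = N := by
      simp [hpref]; omega
    have hrowk : (pref ++ List.replicate (N - k) (List.replicate N (1 : Int))).getD k []
        = List.replicate N (1 : Int) := by
      rw [List.getD_eq_getElem?_getD, List.getElem?_append_right (show pref.length ≤ k by omega),
        hpl, Nat.sub_self]
      simp [show 0 < N - k by omega]
    have hgetrow : 1 ≤ k → (pref ++ List.replicate (N - k) (List.replicate N (1 : Int))).getD (k - 1) []
        = pvRow m N (k - 1) := by
      intro h1
      rw [List.getD_eq_getElem?_getD, List.getElem?_append_left (show k - 1 < pref.length by omega)]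
      simp [hpref, List.getElem?_range (show k - 1 < k by omega)]
    have hprev : 1 ≤ k → ((pref ++ List.replicate (N - k) (List.replicate N (1 : Int))).getD (k - 1) []).getD 0 0
        = pvPw m (k - 1) := by
      intro h1
      rw [hgetrow h1]
      unfold pvRow
      rw [List.getD_eq_getElem?_getD]
      simp [List.getElem?_range (show 0 < N by omega)]
    rw [pv_inner_fold m N k (by omega) _ hlen (by rw [hrowk]; simp) hprev]
    have hrepl : List.replicate (N - k) (List.replicate N (1 : Int))
        = List.replicate N (1 : Int) :: List.replicate (N - (k + 1)) (List.replicate N (1 : Int)) := by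
      rw [show N - k = (N - (k + 1)) + 1 by omega, List.replicate_succ]
    rw [hrepl, List.set_append_right _ _ (show pref.length ≤ k by omega), hpl, Nat.sub_self,
      List.set_cons_zero]
    simp [hpref]

-- closed form of A for positive n
lemma pv_solve_closed (n m : Int) (_h : 0 < n) :
    solve n m
    = (List.range n.toNat).map (fun i => (List.range n.toNat).map (fun j => pvPw m (i + j))) := by
  unfold solve
  have hN : (n - 0).toNat = n.toNat := by norm_num
  have htab : (PySem.List.pyRange 0 n 1).map
      (fun _ => (PySem.List.pyRange 0 n 1).map (fun _ => (1 : Int)))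
      = List.replicate n.toNat (List.replicate n.toNat (1 : Int)) := by
    simp [List.map_const', PySem.List.length_pyRange_one]
  rw [htab, PySem.List.pyRange_one, List.foldl_map, hN]
  have hcong : ∀ (acc : List (List Int)) (k : Nat), k ∈ List.range n.toNat →
      pvInner n m ((0 : Int) + (k : Int)) acc
      = (List.range n.toNat).foldl (pvStepN m k) acc := by
    intro acc k _
    rw [zero_add, pv_inner_eq, hN]
  rw [show List.foldl (fun (x : List (List Int)) (y : Nat) => pvInner n m ((0 : Int) + (y : Int)) x)
        (List.replicate n.toNat (List.replicate n.toNat (1 : Int))) (List.range n.toNat)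
      = List.foldl (fun acc k => List.foldl (pvStepN m k) acc (List.range n.toNat))
        (List.replicate n.toNat (List.replicate n.toNat (1 : Int))) (List.range n.toNat)
    from PySem.List.foldl_congr_mem _ _ _ _ hcong]
  rw [pv_outer_aux m n.toNat n.toNat le_rfl, Nat.sub_self,
    List.replicate_zero, List.append_nil]
  rfl

-- ===== VERDICT (by name: the statement is the Claim_ definition above) =====
theorem solve_spec : Claim_equal_solve := by
  intro n m _ _
  unfold Spec_solve
  by_cases h : 0 < n
  · rw [pv_solve_closed n m h, pv_alt_closed n m h]
  · have hn : n ≤ 0 := by omega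
    unfold solve solve_alt
    rw [if_pos hn, PySem.List.pyRange_one_eq_nil (by omega)]
    simp
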